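-- pv_equiv track=rewrite | github.com/javilledo/advent-of-code | 2025/AdventOfCode2025_day02.py | is_repetitive_any
-- ===== SOURCE A (Python) =====
-- def is_repetitive_any(n):
--     s = str(n)
--     length = len(s)
--     for l in range(1, length // 2 + 1):
--         if length % l == 0:
--             substring = s[:l]
--             repetitions = length // l
--             if substring * repetitions == s:
--                 return True
--     return False
-- ===== SOURCE B (Python) =====
-- def is_repetitive_any(n):
--     # Idiomatic rewrite: s is a repetition of a shorter block iff s occurs in
--     # (s+s) with the first and last characters removed (shift-and-search identity).
--     s = str(n)
--     return s in (s + s)[1:-1]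
-- ===== Notes on version B (the rewrite author's own statement) =====
-- stated objective: idiomatic
-- what changed: Replaces the loop over divisor lengths with repeated string multiplication by the standard doubled-string trick: s is periodic iff s occurs in (s+s)[1:-1], a single substring search.
import Mathlib
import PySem

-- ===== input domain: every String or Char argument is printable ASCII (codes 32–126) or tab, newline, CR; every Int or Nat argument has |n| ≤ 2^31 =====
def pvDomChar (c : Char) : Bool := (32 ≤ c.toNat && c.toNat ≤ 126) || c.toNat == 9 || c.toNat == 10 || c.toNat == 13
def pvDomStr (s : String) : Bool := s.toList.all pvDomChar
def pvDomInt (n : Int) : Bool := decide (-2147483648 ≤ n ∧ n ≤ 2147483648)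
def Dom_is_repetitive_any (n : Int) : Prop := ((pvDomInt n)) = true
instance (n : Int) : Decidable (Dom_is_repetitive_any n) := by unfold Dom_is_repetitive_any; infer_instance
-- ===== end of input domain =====

-- B replaces A's loop over divisor lengths with the doubled-string trick (s in (s+s)[1:-1]); idiomatic, same return value.

-- ===== PORT A =====
def is_repetitive_any (n : Int) : Bool :=
  let s := PySem.Int.toChars n
  let length : Int := (s.length : Int)
  (PySem.List.pyRange 1 (PySem.Int.floordiv length 2 + 1)).any fun l =>
    if PySem.Int.mod length l == 0 then
      PySem.List.pyRepeat (PySem.Chars.slice s none (some l)) (PySem.Int.floordiv length l) == s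
    else false

-- ===== PORT B =====
def is_repetitive_any_alt (n : Int) : Bool :=
  let s := PySem.Int.toChars n
  PySem.Chars.isIn s (PySem.Chars.slice (s ++ s) (some 1) (some (-1)))

-- ===== PRECONDITION & SPEC =====
def Spec_is_repetitive_any (n : Int) (out : Bool) : Prop := out = is_repetitive_any_alt n
instance (n : Int) (out : Bool) : Decidable (Spec_is_repetitive_any n out) := by unfold Spec_is_repetitive_any; infer_instance

-- ===== CLAIM (what is proved, stated in full; the proofs are below) =====
def Claim_equal_is_repetitive_any : Prop := ∀ (n : Int), Dom_is_repetitive_any n → Spec_is_repetitive_any n (is_repetitive_any n)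

-- ===== LEMMAS AND PROOFS =====

theorem aux_toDigitsCore_len (b : ℕ) : ∀ (f n : ℕ) (acc : List Char),
    acc.length ≤ (Nat.toDigitsCore b f n acc).length := by
  intro f
  induction f with
  | zero => intro n acc; simp [Nat.toDigitsCore]
  | succ f ih =>
    intro n acc
    simp only [Nat.toDigitsCore]
    split
    · simp
    · exact le_trans (by simp) (ih (n / b) (Nat.digitChar (n % b) :: acc))

theorem aux_toDigits_ne_nil (b n : ℕ) : Nat.toDigits b n ≠ [] := by
  unfold Nat.toDigits
  simp only [Nat.toDigitsCore]
  split
  · simp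
  · intro h
    have := aux_toDigitsCore_len b n (n / b) [Nat.digitChar (n % b)]
    rw [h] at this
    simp at this

-- str(n) is never the empty string
theorem pvToCharsNeNil (n : Int) : PySem.Int.toChars n ≠ [] := by
  unfold PySem.Int.toChars
  split
  · simp
  · exact aux_toDigits_ne_nil 10 n.toNat

theorem pvFlatRepLen {α : Type} (m : ℕ) (P : List α) :
    ((List.replicate m P).flatten).length = m * P.length := by
  simp [List.length_flatten, List.map_replicate, List.sum_replicate, smul_eq_mul]

theorem pvFlatRepGet? {α : Type} (m : ℕ) (P : List α) (i : ℕ) (hi : i < m * P.length) :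
    ((List.replicate m P).flatten)[i]? = P[i % P.length]? := by
  have h0 : 0 < P.length := by by_contra hc; push_neg at hc; interval_cases hP : P.length <;> omega
  induction m generalizing i with
  | zero => omega
  | succ m ih =>
    rw [List.replicate_succ, List.flatten_cons]
    by_cases hip : i < P.length
    · rw [List.getElem?_append_left hip, Nat.mod_eq_of_lt hip]
    · push_neg at hip
      rw [List.getElem?_append_right hip]
      rw [ih (i - P.length) (by rw [Nat.succ_mul] at hi; omega)]
      rw [Nat.mod_eq_sub_mod hip]

theorem aux_flat_comm {α : Type} (m : ℕ) (P : List α) :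
    (List.replicate m P).flatten ++ P = P ++ (List.replicate m P).flatten := by
  induction m with
  | zero => simp
  | succ m ih =>
    rw [List.replicate_succ, List.flatten_cons, List.append_assoc, ih]

-- a concatenation of m ≥ 1 copies of P is fixed by rotation by |P|
theorem pvRepRotate {α : Type} (P : List α) (m : ℕ) (hm : 1 ≤ m) :
    ((List.replicate m P).flatten).rotate P.length = (List.replicate m P).flatten := by
  obtain ⟨m', rfl⟩ : ∃ m', m = m' + 1 := ⟨m - 1, by omega⟩
  rw [List.replicate_succ, List.flatten_cons]
  rw [List.rotate_eq_drop_append_take (by simp)]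
  rw [List.drop_left, List.take_left]
  exact aux_flat_comm m' P

theorem pvRotateMul {α : Type} (cs : List α) (k : ℕ) (h : cs.rotate k = cs) (t : ℕ) :
    cs.rotate (t * k) = cs := by
  induction t with
  | zero => simp
  | succ t ih => rw [Nat.succ_mul, ← List.rotate_rotate, ih, h]

-- Bezout: if rotation by k fixes cs then so does rotation by gcd k |cs|
theorem pvRotateGcd {α : Type} (cs : List α) (k : ℕ) (h : cs.rotate k = cs) :
    cs.rotate (Nat.gcd k cs.length) = cs := by
  rcases Nat.eq_zero_or_pos cs.length with h0 | hN
  · rw [List.length_eq_zero_iff] at h0; subst h0; simp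
  · set N := cs.length with hNdef
    set d := Nat.gcd k N with hd
    set a := Nat.gcdA k N with ha
    set t : ℕ := (a % (N : ℤ)).toNat with ht
    have hNz : (N : ℤ) ≠ 0 := by exact_mod_cast hN.ne'
    have hta : (t : ℤ) = a % N := Int.toNat_of_nonneg (Int.emod_nonneg a hNz)
    have hbez : (d : ℤ) = k * a + N * Nat.gcdB k N := Nat.gcd_eq_gcd_ab k N
    have hmodZ : ((t * k : ℕ) : ℤ) % N = (d : ℤ) % N := by
      push_cast
      rw [hta]
      have h1 : (a % (N:ℤ)) * k % N = a * k % N := by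
        conv_lhs => rw [Int.mul_emod, Int.emod_emod_of_dvd a dvd_rfl, ← Int.mul_emod]
      rw [h1]
      have h2 : a * (k:ℤ) = (d:ℤ) + (N:ℤ) * (-(Nat.gcdB k N)) := by
        rw [hbez]; ring
      rw [h2, Int.add_mul_emod_self_left]
    have hmodN : (t * k) % N = d % N := by
      have := hmodZ
      rw [← Int.natCast_mod, ← Int.natCast_mod] at this
      exact_mod_cast this
    have h1 : cs.rotate ((t * k) % N) = cs := by
      rw [List.rotate_mod]; exact pvRotateMul cs k h t
    calc cs.rotate d = cs.rotate (d % N) := (List.rotate_mod cs d).symm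
      _ = cs.rotate ((t * k) % N) := by rw [hmodN]
      _ = cs := h1

-- a list fixed by rotation by a divisor d of its length is the (length/d)-fold repeat of its first d elements
theorem pvRotateToRep {α : Type} (cs : List α) (d : ℕ) (hd : 1 ≤ d)
    (hdvd : d ∣ cs.length) (h : cs.rotate d = cs) :
    (List.replicate (cs.length / d) (cs.take d)).flatten = cs := by
  rcases Nat.eq_zero_or_pos cs.length with h0 | hN
  · have : cs = [] := List.length_eq_zero_iff.mp h0
    subst this; simp
  · set N := cs.length with hNdef
    have hdN : d ≤ N := Nat.le_of_dvd hN hdvd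
    have step : ∀ i, i < N → cs[(i + d) % N]? = cs[i]? := by
      intro i hi
      have heq : (cs.rotate d)[i]? = cs[i]? := by rw [h]
      rw [List.getElem?_eq_getElem (by simpa using hi)] at heq
      rw [List.getElem_rotate] at heq
      rw [List.getElem?_eq_getElem (Nat.mod_lt _ hN)]
      exact heq
    have periodic : ∀ i, i < N → cs[i]? = cs[i % d]? := by
      intro i
      induction i using Nat.strong_induction_on with
      | _ i ih =>
        intro hi
        by_cases hid : i < d
        · rw [Nat.mod_eq_of_lt hid]
        · push_neg at hid
          have h2 : (i - d + d) % N = i := by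
            rw [Nat.sub_add_cancel hid, Nat.mod_eq_of_lt hi]
          have hstep := step (i - d) (by omega)
          rw [h2] at hstep
          rw [hstep, ih (i - d) (by omega) (by omega), ← Nat.mod_eq_sub_mod hid]
    have hP : (cs.take d).length = d := by simp only [List.length_take]; omega
    apply List.ext_getElem?
    intro i
    by_cases hi : i < N
    · rw [pvFlatRepGet? (N / d) (cs.take d) i (by rw [hP, Nat.div_mul_cancel hdvd]; exact hi)]
      rw [hP]
      have hmd : i % d < d := Nat.mod_lt _ hd
      rw [List.getElem?_take_of_lt hmd]
      exact (periodic i hi).symm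
    · push_neg at hi
      rw [List.getElem?_eq_none, List.getElem?_eq_none hi]
      rw [pvFlatRepLen, hP, Nat.div_mul_cancel hdvd]
      exact hi

-- the window of length |cs| at offset k inside cs ++ cs is the rotation of cs by k
theorem pvTakeDropDouble {α : Type} (cs : List α) (k : ℕ) (hk : k ≤ cs.length) :
    List.take cs.length (List.drop k (cs ++ cs)) = cs.rotate k := by
  rw [List.drop_append_of_le_length hk, List.rotate_eq_drop_append_take hk]
  rw [List.take_append]
  congr 1
  · exact List.take_of_length_le (by simp [List.length_drop])
  · congr 1; simp [List.length_drop]; omega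

theorem pvModNat (N d : ℕ) : PySem.Int.mod (N : ℤ) (d : ℤ) = ((N % d : ℕ) : ℤ) := by
  unfold PySem.Int.mod
  rw [Int.fmod_eq_emod, if_pos (Or.inl (by positivity : (0:ℤ) ≤ (d:ℤ))), add_zero]
  exact (Int.natCast_mod N d).symm

-- characterization of A's divisor loop
theorem pvCharA (cs : List Char) :
    ((PySem.List.pyRange 1 (PySem.Int.floordiv (cs.length : Int) 2 + 1)).any fun l =>
      if PySem.Int.mod (cs.length : Int) l == 0 then
        PySem.List.pyRepeat (PySem.Chars.slice cs none (some l)) (PySem.Int.floordiv (cs.length : Int) l) == cs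
      else false) = true
    ↔ ∃ d : ℕ, 1 ≤ d ∧ d ≤ cs.length / 2 ∧ cs.length % d = 0 ∧
        (List.replicate (cs.length / d) (cs.take d)).flatten = cs := by
  have hfd2 : PySem.Int.floordiv ((cs.length : ℕ) : ℤ) 2 = ((cs.length / 2 : ℕ) : ℤ) := by
    exact_mod_cast PySem.Int.floordiv_natCast cs.length 2
  rw [List.any_eq_true]
  constructor
  · rintro ⟨l, hl, hp⟩
    rw [PySem.List.mem_pyRange_one, hfd2] at hl
    obtain ⟨d, rfl⟩ : ∃ d : ℕ, l = (d : ℤ) :=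
      ⟨l.toNat, (Int.toNat_of_nonneg (by omega)).symm⟩
    have hd1 : 1 ≤ d := by exact_mod_cast hl.1
    have hd2 : d ≤ cs.length / 2 := by omega
    rw [pvModNat] at hp
    split at hp
    · next hc =>
      have hmod : cs.length % d = 0 := by
        have := beq_iff_eq.mp hc; exact_mod_cast this
      rw [beq_iff_eq] at hp
      rw [PySem.Chars.slice_eq_listSlice, PySem.List.slice_to cs (by positivity)] at hp
      have hfdl : PySem.Int.floordiv ((cs.length : ℕ) : ℤ) (d : ℤ) = ((cs.length / d : ℕ) : ℤ) := by
        exact_mod_cast PySem.Int.floordiv_natCast cs.length d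
      rw [hfdl] at hp
      unfold PySem.List.pyRepeat at hp
      simp only [Int.toNat_natCast] at hp
      exact ⟨d, hd1, hd2, hmod, hp⟩
    · exact absurd hp (by simp)
  · rintro ⟨d, hd1, hd2, hmod, hflat⟩
    refine ⟨(d : ℤ), ?_, ?_⟩
    · rw [PySem.List.mem_pyRange_one, hfd2]
      constructor
      · exact_mod_cast hd1
      · omega
    · rw [pvModNat]
      have hc : (((cs.length % d : ℕ) : ℤ) == 0) = true := by
        rw [beq_iff_eq]; exact_mod_cast hmod
      rw [hc]
      simp only [if_true]
      rw [beq_iff_eq]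
      rw [PySem.Chars.slice_eq_listSlice, PySem.List.slice_to cs (by positivity)]
      have hfdl : PySem.Int.floordiv ((cs.length : ℕ) : ℤ) (d : ℤ) = ((cs.length / d : ℕ) : ℤ) := by
        exact_mod_cast PySem.Int.floordiv_natCast cs.length d
      rw [hfdl]
      unfold PySem.List.pyRepeat
      simpa using hflat

-- characterization of B's substring test
theorem pvCharB (cs : List Char) (hne : cs ≠ []) :
    PySem.Chars.isIn cs (PySem.Chars.slice (cs ++ cs) (some 1) (some (-1))) = true
    ↔ ∃ k : ℕ, 1 ≤ k ∧ k + 1 ≤ cs.length ∧ cs.rotate k = cs := by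
  have hN : 1 ≤ cs.length := List.length_pos_iff.mpr hne
  have hD : PySem.Chars.slice (cs ++ cs) (some 1) (some (-1))
      = List.take (2 * cs.length - 2) (List.drop 1 (cs ++ cs)) := by
    rw [PySem.Chars.slice_eq_listSlice]
    unfold PySem.List.slice PySem.List.clampIdx
    simp only [List.length_append]
    norm_num
    split_ifs with h
    · exact absurd h (by omega)
    · rw [show min 1 (cs.length + cs.length) = 1 from by omega,
          show ((cs.length:ℤ) + ↑cs.length + -1).toNat - 1 = 2 * cs.length - 2 from by omega,
          List.drop_one]
  rw [← PySem.Chars.exists_prefix_drop_iff_isIn, hD]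
  constructor
  · rintro ⟨j, hp⟩
    have hlen := hp.length_le
    simp only [List.length_drop, List.length_take, List.length_append] at hlen
    have hj : j + 2 ≤ cs.length := by omega
    rw [List.drop_take, List.drop_drop] at hp
    rw [List.prefix_iff_eq_take, List.take_take] at hp
    have hmin : min cs.length (2 * cs.length - 2 - j) = cs.length := by omega
    rw [hmin] at hp
    refine ⟨j + 1, by omega, by omega, ?_⟩
    rw [Nat.add_comm 1 j] at hp
    rw [← pvTakeDropDouble cs (j + 1) (by omega)]
    exact hp.symm
  · rintro ⟨k, hk1, hkN, hrot⟩
    refine ⟨k - 1, ?_⟩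
    rw [List.drop_take, List.drop_drop, List.prefix_iff_eq_take, List.take_take]
    have h1 : 1 + (k - 1) = k := by omega
    have hmin : min cs.length (2 * cs.length - 2 - (k - 1)) = cs.length := by omega
    rw [h1, hmin, pvTakeDropDouble cs k (by omega), hrot]

-- the periodicity theorem: a proper-divisor period exists iff a nontrivial self-rotation exists
theorem pvMath (cs : List Char) :
    (∃ d : ℕ, 1 ≤ d ∧ d ≤ cs.length / 2 ∧ cs.length % d = 0 ∧
        (List.replicate (cs.length / d) (cs.take d)).flatten = cs)
    ↔ ∃ k : ℕ, 1 ≤ k ∧ k + 1 ≤ cs.length ∧ cs.rotate k = cs := by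
  constructor
  · rintro ⟨d, hd1, hd2, hmod, hflat⟩
    have hN2 : 2 ≤ cs.length := by omega
    have hPlen : (cs.take d).length = d := by
      simp only [List.length_take]; omega
    have hm : 1 ≤ cs.length / d := by
      rw [Nat.le_div_iff_mul_le (by omega)]; omega
    have h := pvRepRotate (cs.take d) (cs.length / d) hm
    rw [hflat, hPlen] at h
    exact ⟨d, hd1, by omega, h⟩
  · rintro ⟨k, hk1, hkN, hrot⟩
    have hN : 0 < cs.length := by omega
    have hdvd : Nat.gcd k cs.length ∣ cs.length := Nat.gcd_dvd_right k cs.length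
    have hd1 : 1 ≤ Nat.gcd k cs.length := Nat.gcd_pos_of_pos_left _ hk1
    have hdk : Nat.gcd k cs.length ≤ k := Nat.le_of_dvd hk1 (Nat.gcd_dvd_left k cs.length)
    have hdN : Nat.gcd k cs.length < cs.length := by omega
    have hd2 : Nat.gcd k cs.length ≤ cs.length / 2 := by
      obtain ⟨c, hc⟩ := hdvd
      have hc2 : 2 ≤ c := by
        rcases Nat.lt_or_ge c 2 with h | h
        · interval_cases c <;> omega
        · exact h
      have : 2 * Nat.gcd k cs.length ≤ Nat.gcd k cs.length * c := by
        calc 2 * Nat.gcd k cs.length = Nat.gcd k cs.length * 2 := by ring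
        _ ≤ Nat.gcd k cs.length * c := Nat.mul_le_mul_left _ hc2
      omega
    exact ⟨Nat.gcd k cs.length, hd1, hd2, Nat.mod_eq_zero_of_dvd hdvd,
      pvRotateToRep cs _ hd1 hdvd (pvRotateGcd cs k hrot)⟩

-- ===== VERDICT (by name: the statement is the Claim_ definition above) =====
theorem is_repetitive_any_spec : Claim_equal_is_repetitive_any := by
  intro n _
  unfold Spec_is_repetitive_any is_repetitive_any is_repetitive_any_alt
  set cs := PySem.Int.toChars n with hcs
  have hne : cs ≠ [] := pvToCharsNeNil n
  simp only []
  rw [Bool.eq_iff_iff, pvCharA cs, pvCharB cs hne]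
  exact pvMath cs
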